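-- pv_equiv track=rewrite | github.com/rt3310/TIL | Algorithm/programmers/bruteforce/mock.py | solution
-- ===== SOURCE A (Python) =====
-- def solution(answers):
--     answer = []
--     one = [1, 2, 3, 4, 5]
--     two = [2, 1, 2, 3, 2, 4, 2, 5]
--     three = [3, 3, 1, 1, 2, 2, 4, 4, 5, 5]
--
--     hit = [0, 0, 0]
--
--     for i in range(len(answers)):
--         if answers[i] == one[i % 5]:
--             hit[0] += 1
--
--     for i in range(len(answers)):
--         if answers[i] == two[i % 8]:
--             hit[1] += 1
--
--     for i in range(0, len(answers)):
--         if answers[i] == three[i % 10]: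
--             hit[2] += 1
--
--     maxnum = max(hit)
--     for i in range(len(hit)):
--         if hit[i] == maxnum:
--             answer.append(i+1)
--
--     return answer
-- ===== SOURCE B (Python) =====
-- def solution(answers):
--     patterns = [[1, 2, 3, 4, 5],
--                 [2, 1, 2, 3, 2, 4, 2, 5],
--                 [3, 3, 1, 1, 2, 2, 4, 4, 5, 5]]
--     # Frequency table keyed by (position mod 40, value); 40 = lcm of the
--     # three pattern periods, so every pattern's expected value at index i
--     # depends only on i % 40. Scores are then 40 table lookups per pattern,
--     # with no per-element pattern comparison.
--     cnt = {}
--     for i, a in enumerate(answers):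
--         k = (i % 40, a)
--         cnt[k] = cnt.get(k, 0) + 1
--     hit = [sum(cnt.get((r, p[r % len(p)]), 0) for r in range(40)) for p in patterns]
--     m = max(hit)
--     return [j + 1 for j in range(3) if hit[j] == m]
-- ===== Notes on version B (the rewrite author's own statement) =====
-- stated objective: alternative
-- what changed: Replaces A's per-element pattern comparisons with a frequency table keyed by (index mod 40, value) built in one pass; each pattern's score is then computed as 40 table lookups (40 = lcm of the pattern periods), with no comparison against patterns while scanning the answers.
import Mathlib
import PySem

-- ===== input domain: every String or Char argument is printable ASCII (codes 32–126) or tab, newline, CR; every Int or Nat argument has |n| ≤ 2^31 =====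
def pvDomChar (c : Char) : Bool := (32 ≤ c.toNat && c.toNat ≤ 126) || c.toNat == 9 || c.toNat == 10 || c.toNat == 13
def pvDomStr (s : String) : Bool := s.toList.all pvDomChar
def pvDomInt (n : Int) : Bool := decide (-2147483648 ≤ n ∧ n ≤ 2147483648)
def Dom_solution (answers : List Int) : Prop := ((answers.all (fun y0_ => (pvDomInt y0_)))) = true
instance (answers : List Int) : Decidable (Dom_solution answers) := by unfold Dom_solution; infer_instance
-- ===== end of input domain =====

-- B replaces A's per-element pattern comparisons with a frequency table keyed by
-- (index mod 40, value) built in one pass; each score is 40 table lookups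
-- (objective: alternative algorithm, same O(n) cost).

-- ===== PORT A =====
-- A: three separate index loops `for i in range(len(answers))`, one per pattern, then max and a build loop.
def solution (answers : List Int) : List Int :=
  let one : List Int := [1, 2, 3, 4, 5]
  let two : List Int := [2, 1, 2, 3, 2, 4, 2, 5]
  let three : List Int := [3, 3, 1, 1, 2, 2, 4, 4, 5, 5]
  let hit0 : Int := (PySem.List.pyRange 0 answers.length 1).foldl
    (fun h i => if PySem.List.pyGetD answers i 0 = PySem.List.pyGetD one (PySem.Int.mod i 5) 0 then h + 1 else h) 0
  let hit1 : Int := (PySem.List.pyRange 0 answers.length 1).foldl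
    (fun h i => if PySem.List.pyGetD answers i 0 = PySem.List.pyGetD two (PySem.Int.mod i 8) 0 then h + 1 else h) 0
  let hit2 : Int := (PySem.List.pyRange 0 answers.length 1).foldl
    (fun h i => if PySem.List.pyGetD answers i 0 = PySem.List.pyGetD three (PySem.Int.mod i 10) 0 then h + 1 else h) 0
  let maxnum : Int := (PySem.List.max? [hit0, hit1, hit2] (fun x => x)).getD 0
  (PySem.List.pyRange 0 3 1).foldl
    (fun ans i => if PySem.List.pyGetD [hit0, hit1, hit2] i 0 = maxnum then ans ++ [i + 1] else ans) []

-- ===== PORT B =====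
-- B: one pass building a counter keyed by (i % 40, a), then each score is 40 lookups.
def solution_alt (answers : List Int) : List Int :=
  let patterns : List (List Int) := [[1, 2, 3, 4, 5], [2, 1, 2, 3, 2, 4, 2, 5], [3, 3, 1, 1, 2, 2, 4, 4, 5, 5]]
  let cnt : PySem.Dict (Int × Int) Int :=
    (PySem.List.enumerate answers 0).foldl
      (fun d q => d.insert (PySem.Int.mod q.1 40, q.2) (d.getD (PySem.Int.mod q.1 40, q.2) 0 + 1))
      PySem.Dict.empty
  let hit : List Int := patterns.map (fun p =>
    (PySem.List.pyRange 0 40 1).foldl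
      (fun s r => s + cnt.getD (r, PySem.List.pyGetD p (PySem.Int.mod r (p.length : Int)) 0) 0) 0)
  let m : Int := (PySem.List.max? hit (fun x => x)).getD 0
  ((PySem.List.pyRange 0 3 1).filter (fun j => PySem.List.pyGetD hit j 0 == m)).map (fun j => j + 1)

-- ===== PRECONDITION & SPEC =====
def Spec_solution (answers : List Int) (out : List Int) : Prop := out = solution_alt answers
instance (answers : List Int) (out : List Int) : Decidable (Spec_solution answers out) := by unfold Spec_solution; infer_instance

-- ===== CLAIM (what is proved, stated in full; the proofs are below) =====
def Claim_equal_solution : Prop := ∀ (answers : List Int), Dom_solution answers → Spec_solution answers (solution answers)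

-- ===== LEMMAS AND PROOFS =====

-- enumerate as a map over List.range (with default-0 indexing, exact on members)
lemma enumerate_eq_map_range (xs : List Int) : ∀ (s : Int),
    PySem.List.enumerate xs s
      = (List.range xs.length).map (fun (k : Nat) => ((s + (k : Int)), xs.getD k 0)) := by
  induction xs with
  | nil => intro s; simp [PySem.List.enumerate_nil]
  | cons x xs ih =>
      intro s
      simp [PySem.List.enumerate_cons, ih (s + 1), List.range_succ_eq_map,
        List.map_map, Function.comp]
      intro a _
      ring

-- A's index-loop count over one pattern, as a countP over List.range
lemma scanA (xs : List Int) (f : Int → Int) :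
    (PySem.List.pyRange 0 xs.length 1).foldl
        (fun h i => if PySem.List.pyGetD xs i 0 = f i then h + 1 else h) 0
      = ((List.range xs.length).countP (fun k => xs.getD k 0 == f k) : Int) := by
  rw [PySem.List.pyRange_one]
  rw [List.foldl_map]
  have h := PySem.List.foldl_count_if (fun k : Nat => xs.getD k 0 == f k) (List.range xs.length) 0
  simp only [beq_iff_eq] at h
  simpa using h

-- A's per-pattern count as a countP over the enumerate list
lemma count_eq (xs : List Int) (f : Int → Int) :
    (PySem.List.pyRange 0 xs.length 1).foldl
        (fun h i => if PySem.List.pyGetD xs i 0 = f i then h + 1 else h) 0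
      = ((PySem.List.enumerate xs 0).countP (fun q => q.2 == f q.1) : Int) := by
  rw [scanA, enumerate_eq_map_range xs 0, List.countP_map]
  simp only [zero_add]
  rfl

-- sum over r < 40 of the multiplicity of (r, f r) = count of pairs lying on f's graph
lemma sum_count_graph (f : Int → Int) : ∀ (qs : List (Int × Int)),
    (∀ q ∈ qs, 0 ≤ q.1 ∧ q.1 < 40) →
    (∑ k ∈ Finset.range 40, (qs.count (((k : Nat) : Int), f k) : Int))
      = (qs.countP (fun q => q.2 == f q.1) : Int) := by
  intro qs
  induction qs with
  | nil => intro _; simp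
  | cons q qs ih =>
      intro hmem
      have hq := hmem q (List.mem_cons_self)
      have hqs := fun x hx => hmem x (List.mem_cons_of_mem _ hx)
      simp only [List.count_cons, List.countP_cons] at *
      push_cast
      rw [Finset.sum_add_distrib, ih hqs]
      have hsingle : (∑ k ∈ Finset.range 40,
          (if q == (((k : Nat) : Int), f k) then (1 : Int) else 0))
            = if q.2 == f q.1 then 1 else 0 := by
        rw [Finset.sum_eq_single q.1.toNat]
        · have h1 : ((q.1.toNat : Nat) : Int) = q.1 := Int.toNat_of_nonneg hq.1
          by_cases h : q.2 = f q.1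
          · simp [h1, Prod.ext_iff, h]
          · simp [h1, Prod.ext_iff, h]
        · intro b _ hb
          have hne : q.1 ≠ ((b : Nat) : Int) := by
            intro he; apply hb; omega
          simp [Prod.ext_iff, hne]
        · intro hnot
          exfalso
          apply hnot
          rw [Finset.mem_range]
          omega
      rw [hsingle]

-- a sum of a map over pyRange 0 40 1 as a Finset.range sum
lemma range_sum_bridge (g : Int → Int) :
    ((PySem.List.pyRange 0 40 1).map g).sum = ∑ k ∈ Finset.range 40, g ((k : Nat) : Int) := by
  rw [PySem.List.pyRange_one]
  simp only [List.map_map, Function.comp_def, zero_add]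
  norm_num
  rfl

-- B's 40-lookup sum over the counter equals A's countP, for one pattern
lemma lookup_sum_eq (xs : List Int) (p : List Int) (hL : (p.length : Int) ∣ 40)
    (hpos : 0 < (p.length : Int)) :
    (PySem.List.pyRange 0 40 1).foldl
        (fun s r => s +
          (((PySem.List.enumerate xs 0).foldl
              (fun d q => d.insert (PySem.Int.mod q.1 40, q.2)
                (d.getD (PySem.Int.mod q.1 40, q.2) 0 + 1))
              PySem.Dict.empty).getD
            (r, PySem.List.pyGetD p (PySem.Int.mod r (p.length : Int)) 0) 0)) 0
      = ((PySem.List.enumerate xs 0).countP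
          (fun q => q.2 == PySem.List.pyGetD p (PySem.Int.mod q.1 (p.length : Int)) 0) : Int) := by
  set key : Int × Int → Int × Int := fun q => (PySem.Int.mod q.1 40, q.2) with hkey
  have hcnt : (PySem.List.enumerate xs 0).foldl
      (fun d q => d.insert (key q) (d.getD (key q) 0 + 1)) PySem.Dict.empty
        = PySem.Dict.counter ((PySem.List.enumerate xs 0).map key) := by
    rw [← PySem.Dict.foldl_insert_getD_add_one_eq_counter, List.foldl_map]
  rw [show (fun (d : PySem.Dict (Int × Int) Int) (q : Int × Int) =>
        d.insert (PySem.Int.mod q.1 40, q.2) (d.getD (PySem.Int.mod q.1 40, q.2) 0 + 1))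
      = (fun d q => d.insert (key q) (d.getD (key q) 0 + 1)) from rfl, hcnt]
  rw [PySem.List.foldl_add]
  simp only [PySem.Dict.getD_counter, zero_add]
  rw [range_sum_bridge]
  have hbound : ∀ q ∈ (PySem.List.enumerate xs 0).map key, 0 ≤ q.1 ∧ q.1 < 40 := by
    intro q hqmem
    rcases List.mem_map.mp hqmem with ⟨q', _, rfl⟩
    exact ⟨PySem.Int.mod_nonneg _ (by norm_num), PySem.Int.mod_lt _ (by norm_num)⟩
  rw [sum_count_graph (fun r => PySem.List.pyGetD p (PySem.Int.mod r (p.length : Int)) 0)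
    ((PySem.List.enumerate xs 0).map key) hbound, List.countP_map]
  have hfun : ((fun q : Int × Int =>
        q.2 == PySem.List.pyGetD p (PySem.Int.mod q.1 (p.length : Int)) 0) ∘ key)
      = (fun q : Int × Int =>
        q.2 == PySem.List.pyGetD p (PySem.Int.mod q.1 (p.length : Int)) 0) := by
    funext q
    simp only [Function.comp_apply, hkey]
    congr 2
    -- (q.1 % 40) % L = q.1 % L  since L ∣ 40 and both moduli are positive
    rw [PySem.Int.mod_eq_emod_of_pos (by norm_num : (0:Int) < 40),
        PySem.Int.mod_eq_emod_of_pos hpos, PySem.Int.mod_eq_emod_of_pos hpos]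
    exact Int.emod_emod_of_dvd _ hL
  rw [hfun]

-- ===== VERDICT (by name: the statement is the Claim_ definition above) =====
set_option maxRecDepth 4000 in
theorem solution_spec : Claim_equal_solution := by
  intro answers _
  unfold Spec_solution solution solution_alt
  dsimp only [List.map_cons, List.map_nil]
  rw [lookup_sum_eq answers [1,2,3,4,5] (by decide) (by decide),
      lookup_sum_eq answers [2,1,2,3,2,4,2,5] (by decide) (by decide),
      lookup_sum_eq answers [3,3,1,1,2,2,4,4,5,5] (by decide) (by decide)]
  norm_num only [List.length_cons, List.length_nil]
  simp only [count_eq]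
  have hr : PySem.List.pyRange 0 3 1 = [0, 1, 2] := by decide
  rw [hr]
  set c0 : Int := ((PySem.List.enumerate answers 0).countP
    (fun q => q.2 == PySem.List.pyGetD [1,2,3,4,5] (PySem.Int.mod q.1 5) 0) : Int)
  set c1 : Int := ((PySem.List.enumerate answers 0).countP
    (fun q => q.2 == PySem.List.pyGetD [2,1,2,3,2,4,2,5] (PySem.Int.mod q.1 8) 0) : Int)
  set c2 : Int := ((PySem.List.enumerate answers 0).countP
    (fun q => q.2 == PySem.List.pyGetD [3,3,1,1,2,2,4,4,5,5] (PySem.Int.mod q.1 10) 0) : Int)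
  simp only [List.foldl_cons, List.foldl_nil, List.filter_cons, List.filter_nil]
  set m : Int := (PySem.List.max? [c0, c1, c2] (fun x => x)).getD 0 with hm
  have e0 : PySem.List.pyGetD [c0, c1, c2] (0 : Int) 0 = c0 := rfl
  have e1 : PySem.List.pyGetD [c0, c1, c2] (1 : Int) 0 = c1 := rfl
  have e2 : PySem.List.pyGetD [c0, c1, c2] (2 : Int) 0 = c2 := rfl
  rw [e0, e1, e2]
  clear_value c0 c1 c2 m
  clear e0 e1 e2 hr hm
  by_cases h0 : c0 = m <;> by_cases h1 : c1 = m <;> by_cases h2 : c2 = m <;>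
    simp_all
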